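-- pv_equiv track=rewrite | github.com/pinobatch/pyfhbg | mtplane.py | boolstoruns
-- ===== SOURCE A (Python) =====
-- def boolstoruns(row):
--     """Convert an iterable of booleans to an iterator of (start, length) tuples."""
--     # TO DO: test
--     runstart = None
--     for (x, pred) in enumerate(row):
--         if pred:
--             if runstart is None:
--                 runstart = x
--         else:
--             if runstart is not None:
--                 yield (runstart, x - runstart)
--                 runstart = None
--     if runstart is not None:
--         yield (runstart, x + 1 - runstart)
-- ===== SOURCE B (Python) =====
-- def boolstoruns(row):
--     """Convert an iterable of booleans to an iterator of (start, length) tuples."""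
--     row = list(row)
--     n = len(row)
--     i = 0
--     while i < n:
--         if row[i]:
--             j = i + 1
--             while j < n and row[j]:
--                 j += 1
--             yield (i, j - i)
--             i = j
--         else:
--             j = i + 1
--             while j < n and not row[j]:
--                 j += 1
--             i = j
-- ===== Notes on version B (the rewrite author's own statement) =====
-- stated objective: alternative
-- what changed: Replaces A's runstart-sentinel state machine (tracking an optional run start across single-element steps, with a post-loop flush) by a two-pointer group scan that finds each maximal run of equal values at once and yields (start, length) for the True runs.
import Mathlib
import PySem

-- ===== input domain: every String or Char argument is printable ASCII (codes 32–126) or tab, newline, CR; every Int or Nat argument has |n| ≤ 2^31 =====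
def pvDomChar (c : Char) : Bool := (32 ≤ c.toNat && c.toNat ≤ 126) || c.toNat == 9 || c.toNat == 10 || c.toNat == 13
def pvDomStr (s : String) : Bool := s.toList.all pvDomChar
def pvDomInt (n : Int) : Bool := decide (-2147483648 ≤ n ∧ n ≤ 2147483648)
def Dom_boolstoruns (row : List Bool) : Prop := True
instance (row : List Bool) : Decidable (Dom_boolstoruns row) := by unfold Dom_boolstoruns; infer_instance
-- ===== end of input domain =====

-- B replaces A's runstart-sentinel state machine with a two-pointer maximal-group scan; same O(n) cost, alternative structure.


-- ===== PORT A =====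
-- A's loop: x is the current index, rs the optional run start; the [] case is the
-- post-loop flush (there x = len(row) = last index + 1, matching Python's x + 1).
def boolstorunsGo (x : Int) (rs : Option Int) : List Bool → List (Int × Int)
  | [] =>
    match rs with
    | none => []
    | some r => [(r, x - r)]
  | pred :: rest =>
    if pred then
      boolstorunsGo (x + 1) (match rs with | none => some x | some r => some r) rest
    else
      match rs with
      | none => boolstorunsGo (x + 1) none rest
      | some r => (r, x - r) :: boolstorunsGo (x + 1) none rest

def boolstoruns (row : List Bool) : List (Int × Int) := boolstorunsGo 0 none row

-- ===== PORT B =====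
-- B's outer while loop: at index i, scan the maximal group of equal values
-- (the inner while loops = takeWhile/dropWhile), emit (i, length) for True groups.
def boolstorunsAltGo (i : Int) : List Bool → List (Int × Int)
  | [] => []
  | true :: rest =>
    let k : Int := 1 + ((rest.takeWhile (fun b => b)).length : Int)
    (i, k) :: boolstorunsAltGo (i + k) (rest.dropWhile (fun b => b))
  | false :: rest =>
    let k : Int := 1 + ((rest.takeWhile (fun b => !b)).length : Int)
    boolstorunsAltGo (i + k) (rest.dropWhile (fun b => !b))
  termination_by l => l.length
  decreasing_by
    all_goals simp; exact List.length_dropWhile_le _ _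

def boolstoruns_alt (row : List Bool) : List (Int × Int) := boolstorunsAltGo 0 row

-- ===== PRECONDITION & SPEC =====
def Spec_boolstoruns (row : List Bool) (out : List (Int × Int)) : Prop := out = boolstoruns_alt row
instance (row : List Bool) (out : List (Int × Int)) : Decidable (Spec_boolstoruns row out) := by unfold Spec_boolstoruns; infer_instance

-- ===== CLAIM (what is proved, stated in full; the proofs are below) =====
def Claim_equal_boolstoruns : Prop := ∀ (row : List Bool), Dom_boolstoruns row → Spec_boolstoruns row (boolstoruns row)

-- ===== LEMMAS AND PROOFS =====

-- Skipping one leading False is the same as skipping the whole False group.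
theorem altGo_false_cons (l : List Bool) (i : Int) :
    boolstorunsAltGo i (false :: l) = boolstorunsAltGo (i + 1) l := by
  match l with
  | [] => simp [boolstorunsAltGo]
  | true :: rest => simp [boolstorunsAltGo]
  | false :: rest =>
    rw [show boolstorunsAltGo i (false :: false :: rest)
        = boolstorunsAltGo (i + (1 + (((false :: rest).takeWhile (fun b => !b)).length : Int)))
            ((false :: rest).dropWhile (fun b => !b)) from by simp [boolstorunsAltGo]]
    rw [show boolstorunsAltGo (i + 1) (false :: rest)
        = boolstorunsAltGo (i + 1 + (1 + ((rest.takeWhile (fun b => !b)).length : Int)))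
            (rest.dropWhile (fun b => !b)) from by simp [boolstorunsAltGo]]
    simp only [List.takeWhile, List.dropWhile]
    norm_num
    congr 1
    ring

theorem go_both_eq (l : List Bool) :
    (∀ x : Int, boolstorunsGo x none l = boolstorunsAltGo x l)
    ∧ (∀ x r : Int,
        boolstorunsGo x (some r) l
          = (r, x + ((l.takeWhile (fun b => b)).length : Int) - r)
              :: boolstorunsAltGo (x + ((l.takeWhile (fun b => b)).length : Int))
                  (l.dropWhile (fun b => b))) := by
  induction l with
  | nil =>
    constructor
    · intro x; simp [boolstorunsGo, boolstorunsAltGo]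
    · intro x r; simp [boolstorunsGo, boolstorunsAltGo]
  | cons b rest ih =>
    obtain ⟨ihn, ihs⟩ := ih
    constructor
    · intro x
      cases b with
      | false =>
        rw [show boolstorunsGo x none (false :: rest) = boolstorunsGo (x + 1) none rest from by
          simp [boolstorunsGo]]
        rw [ihn, altGo_false_cons]
      | true =>
        rw [show boolstorunsGo x none (true :: rest) = boolstorunsGo (x + 1) (some x) rest from by
          simp [boolstorunsGo]]
        rw [ihs (x + 1) x]
        rw [show boolstorunsAltGo x (true :: rest)
            = (x, 1 + ((rest.takeWhile (fun b => b)).length : Int))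
                :: boolstorunsAltGo (x + (1 + ((rest.takeWhile (fun b => b)).length : Int)))
                    (rest.dropWhile (fun b => b)) from by simp [boolstorunsAltGo]]
        rw [show x + 1 + ((rest.takeWhile (fun b => b)).length : Int)
            = x + (1 + ((rest.takeWhile (fun b => b)).length : Int)) from by ring]
        norm_num
    · intro x r
      cases b with
      | true =>
        rw [show boolstorunsGo x (some r) (true :: rest) = boolstorunsGo (x + 1) (some r) rest from by
          simp [boolstorunsGo]]
        rw [ihs]
        simp only [List.takeWhile, List.dropWhile]
        norm_num
        rw [show x + 1 + ((rest.takeWhile (fun b => b)).length : Int)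
            = x + (((rest.takeWhile (fun b => b)).length : Int) + 1) from by ring]
        exact ⟨rfl, rfl⟩
      | false =>
        rw [show boolstorunsGo x (some r) (false :: rest)
            = (r, x - r) :: boolstorunsGo (x + 1) none rest from by simp [boolstorunsGo]]
        simp only [List.takeWhile, List.dropWhile]
        norm_num
        rw [ihn, altGo_false_cons]

-- ===== VERDICT (by name: the statement is the Claim_ definition above) =====
theorem boolstoruns_spec : Claim_equal_boolstoruns := by
  intro row _
  unfold Spec_boolstoruns boolstoruns boolstoruns_alt
  exact (go_both_eq row).1 0
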